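-- pv_equiv track=rewrite | github.com/anikaev/tochka | run.py | check_capacity
-- ===== SOURCE A (Python) =====
-- def check_capacity(max_capacity: int, guests: list) -> bool:
--     inn = sorted(gs['check-in'] for gs in guests)
--     out = sorted(gs['check-out'] for gs in guests)
--
--     cur = 0
--     i,j = 0,0
--     while i < len(guests):
--         if inn[i] >= out[j]:
--             cur -=1
--             j +=1
--         cur += 1
--         if cur> max_capacity:
--             return False
--         i += 1
--
--     return True
-- ===== SOURCE B (Python) =====
-- def check_capacity(max_capacity: int, guests: list) -> bool:
--     ins = [g['check-in'] for g in guests]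
--     outs = [g['check-out'] for g in guests]
--     return all(sum(t <= a for t in ins) - sum(t <= a for t in outs) <= max_capacity
--                for a in ins)
-- ===== Notes on version B (the rewrite author's own statement) =====
-- stated objective: alternative
-- what changed: Replaces sort + two-pointer sweep by a direct per-guest occupancy count: the load when guest a checks in is (number of check-ins <= a's check-in) minus (number of check-outs <= it); no sorting, no index pointers, no running counter.
import Mathlib
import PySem

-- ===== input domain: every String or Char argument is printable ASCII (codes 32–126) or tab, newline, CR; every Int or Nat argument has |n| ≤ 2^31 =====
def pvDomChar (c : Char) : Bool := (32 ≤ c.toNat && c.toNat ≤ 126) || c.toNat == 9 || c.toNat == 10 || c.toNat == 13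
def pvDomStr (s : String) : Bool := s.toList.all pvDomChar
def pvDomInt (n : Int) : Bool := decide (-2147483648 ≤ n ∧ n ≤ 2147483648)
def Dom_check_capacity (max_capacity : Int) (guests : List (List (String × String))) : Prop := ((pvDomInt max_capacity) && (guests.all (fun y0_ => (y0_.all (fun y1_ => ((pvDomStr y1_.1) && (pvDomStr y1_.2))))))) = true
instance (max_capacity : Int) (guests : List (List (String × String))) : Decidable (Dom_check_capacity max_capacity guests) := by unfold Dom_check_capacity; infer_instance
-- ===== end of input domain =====

-- B replaces A's sort + two-pointer sweep by a direct per-check-in occupancy count (no sorting, no pointers); same return value wherever A returns.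


-- ===== PORT A =====
-- the while loop: the first list is the remaining sorted check-ins (pointer i), the second the
-- remaining sorted check-outs (pointer j as the suffix it points into); the '_::_, []' out-case is
-- unreachable on real runs (j ≤ i < len(out) whenever out[j] is read)
def aLoop (max_capacity : Int) : List String → List String → Int → Bool
  | [], _, _ => true
  | _ :: _, [], _ => true
  | x :: inn', o :: out', cur =>
    if o ≤ x then
      let cur2 := cur - 1 + 1
      if cur2 > max_capacity then false else aLoop max_capacity inn' out' cur2
    else
      let cur2 := cur + 1
      if cur2 > max_capacity then false else aLoop max_capacity inn' (o :: out') cur2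



def check_capacity (max_capacity : Int) (guests : List (List (String × String))) : Bool :=
  let inn := PySem.List.sorted (guests.map (fun gs => ((PySem.Dict.mk gs).get? "check-in").getD "")) (fun x => x) false
  let out := PySem.List.sorted (guests.map (fun gs => ((PySem.Dict.mk gs).get? "check-out").getD "")) (fun x => x) false
  aLoop max_capacity inn out 0

-- ===== PORT B =====
def check_capacity_alt (max_capacity : Int) (guests : List (List (String × String))) : Bool :=
  let ins := guests.map (fun gs => ((PySem.Dict.mk gs).get? "check-in").getD "")
  let outs := guests.map (fun gs => ((PySem.Dict.mk gs).get? "check-out").getD "")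
  ins.all (fun a =>
    decide ((ins.countP (fun t => decide (t ≤ a)) : Int)
            - (outs.countP (fun t => decide (t ≤ a)) : Int) ≤ max_capacity))

-- ===== PRECONDITION & SPEC =====
-- Pre_ excludes exactly the inputs where the Python A raises KeyError: a guest dict missing the
-- 'check-in' or the 'check-out' key.
def Pre_check_capacity (max_capacity : Int) (guests : List (List (String × String))) : Prop :=
  ∀ g ∈ guests, ((PySem.Dict.mk g).get? "check-in").isSome = true ∧ ((PySem.Dict.mk g).get? "check-out").isSome = true
instance (max_capacity : Int) (guests : List (List (String × String))) : Decidable (Pre_check_capacity max_capacity guests) := by unfold Pre_check_capacity; infer_instance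
def pvWitness_check_capacity : Int × (List (List (String × String))) := (1, [[("check-in","a"),("check-out","b")]])

def Spec_check_capacity (max_capacity : Int) (guests : List (List (String × String))) (out : Bool) : Prop := out = check_capacity_alt max_capacity guests
instance (max_capacity : Int) (guests : List (List (String × String))) (out : Bool) : Decidable (Spec_check_capacity max_capacity guests out) := by unfold Spec_check_capacity; infer_instance

-- ===== CLAIM (what is proved, stated in full; the proofs are below) =====
def Claim_equal_check_capacity : Prop := ∀ (max_capacity : Int) (guests : List (List (String × String))), Dom_check_capacity max_capacity guests → Pre_check_capacity max_capacity guests → Spec_check_capacity max_capacity guests (check_capacity max_capacity guests)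

-- ===== LEMMAS AND PROOFS =====

theorem sorted_getElem_le (I : List String) (hI : List.Pairwise (· ≤ ·) I)
    {i j : Nat} (hij : i ≤ j) (hj : j < I.length) : I[i]'(by omega) ≤ I[j] := by
  rcases Nat.lt_or_ge i j with h | h
  · exact (List.pairwise_iff_getElem.mp hI) i j (by omega) hj h
  · have : i = j := by omega
    subst this; exact le_refl _

theorem countP_le_mono_ge (I : List String) (k : Nat) (hk : k < I.length)
    (hI : List.Pairwise (· ≤ ·) I) :
    (k : Int) + 1 ≤ (I.countP (fun t => decide (t ≤ I[k])) : Int) := by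
  set p : String → Bool := fun t => decide (t ≤ I[k]) with hp
  have hsplit : I.countP p = (I.take (k+1)).countP p + (I.drop (k+1)).countP p := by
    conv_lhs => rw [← List.take_append_drop (k+1) I]
    rw [List.countP_append]
  have htake : (I.take (k+1)).countP p = (I.take (k+1)).length := by
    rw [List.countP_eq_length]
    intro a ha
    obtain ⟨j, hj, rfl⟩ := List.mem_iff_getElem.mp ha
    have hjlen : j < I.length := by
      have := hj; simp [List.length_take] at this; omega
    have hjk : j ≤ k := by
      have := hj; simp [List.length_take] at this; omega
    have : (I.take (k+1))[j] = I[j]'hjlen := List.getElem_take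
    rw [this]
    exact decide_eq_true (sorted_getElem_le I hI hjk hk)
  have hlen : (I.take (k+1)).length = k + 1 := by simp [List.length_take]; omega
  omega

theorem getElem_countP_pred (I : List String) (a : String)
    (hI : List.Pairwise (· ≤ ·) I) (ha : a ∈ I) :
    ∃ (h : I.countP (fun t => decide (t ≤ a)) - 1 < I.length),
      I[I.countP (fun t => decide (t ≤ a)) - 1] = a ∧
      0 < I.countP (fun t => decide (t ≤ a)) := by
  set p : String → Bool := fun t => decide (t ≤ a) with hp
  have hpos : 0 < I.countP p := List.countP_pos_iff.mpr ⟨a, ha, by simp [hp]⟩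
  have hle : I.countP p ≤ I.length := List.countP_le_length
  obtain ⟨t, ht, rfl⟩ := List.mem_iff_getElem.mp ha
  have hge : (t : Int) + 1 ≤ (I.countP p : Int) := countP_le_mono_ge I t ht hI
  have htc : t ≤ I.countP p - 1 := by omega
  have hclen : I.countP p - 1 < I.length := by omega
  refine ⟨hclen, ?_, hpos⟩
  have h1 : I[t] ≤ I[I.countP p - 1] := sorted_getElem_le I hI htc hclen
  have h2 : I[I.countP p - 1] ≤ I[t] := by
    by_contra hgt
    have hgt : I[t] < I[I.countP p - 1] := lt_of_not_ge fun h => hgt h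
    have hdrop : (I.drop (I.countP p - 1)).countP p = 0 := by
      rw [List.countP_eq_zero]
      intro b hb
      obtain ⟨j, hj, rfl⟩ := List.mem_iff_getElem.mp hb
      have hjlen : I.countP p - 1 + j < I.length := by
        have := hj; simp [List.length_drop] at this; omega
      have heq : (I.drop (I.countP p - 1))[j] = I[I.countP p - 1 + j]'hjlen := by
        simp [List.getElem_drop]
      rw [heq]
      intro hpb
      have hba : I[I.countP p - 1 + j]'hjlen ≤ I[t] := of_decide_eq_true hpb
      have : I[I.countP p - 1] ≤ I[I.countP p - 1 + j]'hjlen :=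
        sorted_getElem_le I hI (by omega) hjlen
      exact absurd (le_trans this hba) (not_le.mpr hgt)
    have hsplit : I.countP p = (I.take (I.countP p - 1)).countP p + (I.drop (I.countP p - 1)).countP p := by
      conv_lhs => rw [← List.take_append_drop (I.countP p - 1) I]
      rw [List.countP_append]
    have : (I.take (I.countP p - 1)).countP p ≤ I.countP p - 1 := by
      calc (I.take (I.countP p - 1)).countP p ≤ (I.take (I.countP p - 1)).length := List.countP_le_length
        _ ≤ I.countP p - 1 := by simp [List.length_take]
    omega
  exact le_antisymm h2 h1
theorem aLoop_eq (C : Int) (R S : List String) (cur : Int)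
    (hlen : R.length ≤ S.length)
    (hR : List.Pairwise (· ≤ ·) R) (hS : List.Pairwise (· ≤ ·) S) :
    (aLoop C R S cur = true ↔
      (R = [] ∨ (cur ≤ C ∧ ∀ (t : Nat) (y : String), R[t]? = some y →
        cur + (t + 1) - (S.countP (fun s => decide (s ≤ y)) : Int) ≤ C))) := by
  induction R generalizing S cur with
  | nil => simp [aLoop]
  | cons x R' ih =>
    cases S with
    | nil => simp at hlen
    | cons o S' =>
      obtain ⟨hxR', hR'⟩ := List.pairwise_cons.mp hR
      obtain ⟨hoS', hS'⟩ := List.pairwise_cons.mp hS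
      have hlen' : R'.length ≤ S'.length := by simp at hlen; omega
      simp only [aLoop]
      by_cases hox : o ≤ x
      · rw [if_pos hox]
        have hcc : cur - 1 + 1 = cur := by ring
        simp only [hcc]
        have hdx : decide (o ≤ x) = true := decide_eq_true hox
        have hx0 : (o :: S').countP (fun s => decide (s ≤ x))
            = S'.countP (fun s => decide (s ≤ x)) + 1 := by
          simp only [List.countP_cons, hdx]; simp
        have hcnt : ∀ y ∈ R', (o :: S').countP (fun s => decide (s ≤ y))
              = S'.countP (fun s => decide (s ≤ y)) + 1 := by
          intro y hy
          have hdy : decide (o ≤ y) = true := decide_eq_true (le_trans hox (hxR' _ hy))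
          simp only [List.countP_cons, hdy]; simp
        split_ifs with hc
        · constructor
          · intro h; exact absurd h (by simp)
          · rintro (h | ⟨h1, _⟩)
            · exact absurd h (by simp)
            · omega
        · rw [ih S' cur hlen' hR' hS']
          constructor
          · rintro (rfl | ⟨hcC, hall⟩)
            · right
              refine ⟨by omega, ?_⟩
              intro t y hy
              cases t with
              | zero =>
                simp only [List.getElem?_cons_zero, Option.some.injEq] at hy
                subst hy
                omega
              | succ j => simp at hy
            · right
              refine ⟨hcC, ?_⟩
              intro t y hy
              cases t with
              | zero =>
                simp only [List.getElem?_cons_zero, Option.some.injEq] at hy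
                subst hy
                omega
              | succ j =>
                simp only [List.getElem?_cons_succ] at hy
                have h1 := hall j y hy
                have h2 := hcnt y (List.mem_of_getElem? hy)
                push_cast
                push_cast at h1
                omega
          · rintro (h | ⟨hcC, hall⟩)
            · exact absurd h (by simp)
            · right
              refine ⟨hcC, ?_⟩
              intro j y hy
              have h1 := hall (j+1) y (by simpa using hy)
              have h2 := hcnt y (List.mem_of_getElem? hy)
              push_cast at h1
              omega
      · rw [if_neg hox]
        have hxo : x < o := lt_of_not_ge hox
        have hzero : (o :: S').countP (fun s => decide (s ≤ x)) = 0 := by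
          rw [List.countP_eq_zero]
          intro b hb
          rcases List.mem_cons.mp hb with rfl | hb'
          · simp [not_le.mpr hxo]
          · have : o ≤ b := hoS' _ hb'
            simp [not_le.mpr (lt_of_lt_of_le hxo this)]
        split_ifs with hc
        · constructor
          · intro h; exact absurd h (by simp)
          · rintro (h | ⟨h1, hall⟩)
            · exact absurd h (by simp)
            · have := hall 0 x (by simp)
              omega
        · rw [ih (o :: S') (cur + 1) (by simp; omega) hR' hS]
          constructor
          · rintro (rfl | ⟨hcC, hall⟩)
            · right
              refine ⟨by omega, ?_⟩
              intro t y hy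
              cases t with
              | zero =>
                simp only [List.getElem?_cons_zero, Option.some.injEq] at hy
                subst hy
                omega
              | succ j => simp at hy
            · right
              refine ⟨by omega, ?_⟩
              intro t y hy
              cases t with
              | zero =>
                simp only [List.getElem?_cons_zero, Option.some.injEq] at hy
                subst hy
                omega
              | succ j =>
                simp only [List.getElem?_cons_succ] at hy
                have h1 := hall j y hy
                push_cast
                omega
          · rintro (h | ⟨hcC, hall⟩)
            · exact absurd h (by simp)
            · right
              refine ⟨by omega, ?_⟩
              intro j y hy
              have h1 := hall (j+1) y (by simpa using hy)
              omega

-- bridge: indexed prefix counts vs per-member counts, on a sorted list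
theorem indexed_iff_member (C : Int) (I O : List String)
    (hI : List.Pairwise (· ≤ ·) I) :
    ((∀ (t : Nat) (y : String), I[t]? = some y →
        (t : Int) + 1 - (O.countP (fun s => decide (s ≤ y)) : Int) ≤ C) ↔
     (∀ a ∈ I, (I.countP (fun t => decide (t ≤ a)) : Int)
               - (O.countP (fun t => decide (t ≤ a)) : Int) ≤ C)) := by
  constructor
  · intro h a ha
    obtain ⟨hlt, heq, hpos⟩ := getElem_countP_pred I a hI ha
    have h1 := h (I.countP (fun t => decide (t ≤ a)) - 1) a
      (by rw [List.getElem?_eq_getElem hlt, heq])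
    omega
  · intro h t y hy
    obtain ⟨hlt, hEq⟩ := List.getElem?_eq_some_iff.mp hy
    have hmem : y ∈ I := List.mem_of_getElem? hy
    have hge := countP_le_mono_ge I t hlt hI
    rw [hEq] at hge
    have h1 := h y hmem
    omega

-- the whole pipeline on the two extracted string lists
theorem main_eq (C : Int) (ins outs : List String) (hlen : ins.length = outs.length) :
    aLoop C (PySem.List.sorted ins (fun x => x) false) (PySem.List.sorted outs (fun x => x) false) 0
      = ins.all (fun a => decide ((ins.countP (fun t => decide (t ≤ a)) : Int)
            - (outs.countP (fun t => decide (t ≤ a)) : Int) ≤ C)) := by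
  set I := PySem.List.sorted ins (fun x => x) false with hIdef
  set O := PySem.List.sorted outs (fun x => x) false with hOdef
  have hpermI : I.Perm ins := PySem.List.sorted_perm ins (fun x => x) false
  have hpermO : O.Perm outs := PySem.List.sorted_perm outs (fun x => x) false
  have hIp : List.Pairwise (· ≤ ·) I := by
    simpa using PySem.List.sorted_pairwise (xs := ins) (key := fun x => x)
  have hOp : List.Pairwise (· ≤ ·) O := by
    simpa using PySem.List.sorted_pairwise (xs := outs) (key := fun x => x)
  have hIlen : I.length = ins.length := hpermI.length_eq
  have hOlen : O.length = outs.length := hpermO.length_eq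
  have hA := aLoop_eq C I O 0 (by omega) hIp hOp
  have hcntI : ∀ a, I.countP (fun t => decide (t ≤ a)) = ins.countP (fun t => decide (t ≤ a)) :=
    fun a => hpermI.countP_eq _
  have hcntO : ∀ a, O.countP (fun t => decide (t ≤ a)) = outs.countP (fun t => decide (t ≤ a)) :=
    fun a => hpermO.countP_eq _
  have hB : (ins.all (fun a => decide ((ins.countP (fun t => decide (t ≤ a)) : Int)
            - (outs.countP (fun t => decide (t ≤ a)) : Int) ≤ C)) = true)
      ↔ ∀ a ∈ ins, (ins.countP (fun t => decide (t ≤ a)) : Int)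
            - (outs.countP (fun t => decide (t ≤ a)) : Int) ≤ C := by
    simp [List.all_eq_true]
  by_cases hnil : ins = []
  · have hInil : I = [] := by
      subst hnil
      exact List.Perm.eq_nil hpermI
    rw [hInil, hnil]
    simp [aLoop]
  · have hInil : I ≠ [] := fun h => hnil (List.Perm.eq_nil ((h ▸ hpermI).symm))
    have hiff : (aLoop C I O 0 = true) ↔
        (ins.all (fun a => decide ((ins.countP (fun t => decide (t ≤ a)) : Int)
            - (outs.countP (fun t => decide (t ≤ a)) : Int) ≤ C)) = true) := by
      rw [hA, hB]
      constructor
      · rintro (h | ⟨_, hall⟩)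
        · exact absurd h hInil
        intro a ha
        have hm := (indexed_iff_member C I O hIp).mp
          (fun t y hy => by have := hall t y hy; omega) a (hpermI.mem_iff.mpr ha)
        have e1 := hcntI a
        have e2 := hcntO a
        omega
      · intro hall
        right
        have hmem : ∀ a ∈ I, (I.countP (fun t => decide (t ≤ a)) : Int)
            - (O.countP (fun t => decide (t ≤ a)) : Int) ≤ C := by
          intro a ha
          have := hall a (hpermI.mem_iff.mp ha)
          have e1 := hcntI a
          have e2 := hcntO a
          omega
        have hidx := (indexed_iff_member C I O hIp).mpr hmem
        have hlpos : 0 < I.length := List.length_pos_iff.mpr hInil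
        constructor
        · have hy : I[I.length - 1]? = some (I[I.length - 1]'(by omega)) :=
            List.getElem?_eq_getElem (by omega)
          have h1 := hidx (I.length - 1) _ hy
          have h2 : O.countP (fun s => decide (s ≤ I[I.length - 1]'(by omega))) ≤ O.length :=
            List.countP_le_length
          omega
        · intro t y hy
          have := hidx t y hy
          omega
    by_cases hb : (ins.all (fun a => decide ((ins.countP (fun t => decide (t ≤ a)) : Int)
            - (outs.countP (fun t => decide (t ≤ a)) : Int) ≤ C)) = true)
    · rw [hb]
      exact hiff.mpr hb
    · have ha : aLoop C I O 0 = false := by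
        cases h : aLoop C I O 0
        · rfl
        · exact absurd (hiff.mp h) hb
      have hb' : (ins.all (fun a => decide ((ins.countP (fun t => decide (t ≤ a)) : Int)
            - (outs.countP (fun t => decide (t ≤ a)) : Int) ≤ C)) = false) := by
        cases h : (ins.all (fun a => decide ((ins.countP (fun t => decide (t ≤ a)) : Int)
            - (outs.countP (fun t => decide (t ≤ a)) : Int) ≤ C)))
        · rfl
        · exact absurd h hb
      rw [ha, hb']

-- ===== VERDICT (by name: the statement is the Claim_ definition above) =====
theorem check_capacity_spec : Claim_equal_check_capacity := by
  unfold Claim_equal_check_capacity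
  intro C guests _ _
  unfold Spec_check_capacity check_capacity check_capacity_alt
  exact main_eq C (guests.map (fun gs => ((PySem.Dict.mk gs).get? "check-in").getD ""))
    (guests.map (fun gs => ((PySem.Dict.mk gs).get? "check-out").getD "")) (by simp)
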